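-- pv_equiv track=rewrite | github.com/KitN/ThinkPython2 | exersizes/moby.py | abecedarian
-- ===== SOURCE A (Python) =====
-- def abecedarian(word):
--     for letter in range(1, len(word)):
--         n = word[letter]
--         p = word[letter-1]
--         follows = ord(n) > ord(p)
--         if follows:
--             continue
--         else:
--             return False
--     return True
-- ===== SOURCE B (Python) =====
-- def abecedarian(word):
--     chars = list(word)
--     return chars == sorted(chars) and len(set(word)) == len(word)
-- ===== Notes on version B (the rewrite author's own statement) =====
-- stated objective: simpler
-- what changed: Replaces the index-based adjacent-pair scan with a sort-and-compare: the word is abecedarian iff its characters equal their sorted order and contain no duplicates.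
import Mathlib
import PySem

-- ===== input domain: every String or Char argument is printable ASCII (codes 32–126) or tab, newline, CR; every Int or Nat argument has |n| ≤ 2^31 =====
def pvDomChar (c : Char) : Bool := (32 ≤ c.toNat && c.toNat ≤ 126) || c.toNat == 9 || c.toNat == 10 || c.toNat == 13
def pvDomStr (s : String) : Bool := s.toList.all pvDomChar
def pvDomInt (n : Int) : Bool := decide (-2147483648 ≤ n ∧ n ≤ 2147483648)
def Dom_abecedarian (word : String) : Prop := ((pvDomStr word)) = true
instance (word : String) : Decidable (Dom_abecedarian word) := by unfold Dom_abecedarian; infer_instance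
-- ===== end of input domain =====

-- B replaces A's index-based adjacent-pair scan by "chars equal their sorted order and contain no duplicate" (simpler, no indexing).

-- ===== PORT A =====
-- the for-loop over range(1, len(word)) with its early 'return False'
def abecedarianGo (w : List Char) : List Int → Bool
  | [] => true
  | letter :: rest =>
    match PySem.List.pyGet? w letter, PySem.List.pyGet? w (letter - 1) with
    | some n, some p =>
      let follows := decide (p.toNat < n.toNat)   -- ord(n) > ord(p)
      if follows then abecedarianGo w rest else false
    | _, _ => false   -- unreachable: range indices are in bounds

def abecedarian (word : String) : Bool :=
  abecedarianGo word.toList (PySem.List.pyRange 1 (word.toList.length : Int) 1)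

-- ===== PORT B =====
def abecedarian_alt (word : String) : Bool :=
  let chars := word.toList
  (chars == PySem.List.sorted chars (fun x => x) false)
    && ((PySem.Set.ofList word.toList).length == word.toList.length)

-- ===== PRECONDITION & SPEC =====
def Spec_abecedarian (word : String) (out : Bool) : Prop := out = abecedarian_alt word
instance (word : String) (out : Bool) : Decidable (Spec_abecedarian word out) := by unfold Spec_abecedarian; infer_instance

-- ===== CLAIM (what is proved, stated in full; the proofs are below) =====
def Claim_equal_abecedarian : Prop := ∀ (word : String), Dom_abecedarian word → Spec_abecedarian word (abecedarian word)

-- ===== LEMMAS AND PROOFS =====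

theorem char_toNat_lt {p n : Char} : p.toNat < n.toNat ↔ p < n := Iff.rfl

-- A's loop starting at index k checks the strict chain on the suffix from k-1.
theorem abecedarianGo_range (cs : List Char) (k : Nat) (hk : 0 < k) :
    abecedarianGo cs (PySem.List.pyRange (k : Int) (cs.length : Int) 1)
      = decide ((cs.drop (k - 1)).IsChain (· < ·)) := by
  by_cases h : cs.length ≤ k
  · rw [PySem.List.pyRange_one_eq_nil (by exact_mod_cast h)]
    have hlen : (cs.drop (k - 1)).length ≤ 1 := by
      simp only [List.length_drop]; omega
    match hd : cs.drop (k - 1), hlen with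
    | [], _ => simp [abecedarianGo]
    | [a], _ => simp [abecedarianGo]
  · replace h := lt_of_not_ge h
    rw [PySem.List.pyRange_one_cons (by exact_mod_cast h)]
    have hk1 : k - 1 < cs.length := by omega
    have hget : PySem.List.pyGet? cs (k : Int) = some cs[k] :=
      PySem.List.pyGet?_ofNat (h := h)
    have hget' : PySem.List.pyGet? cs ((k : Int) - 1) = some cs[k - 1] := by
      have e : ((k : Int) - 1) = ((k - 1 : Nat) : Int) := by omega
      rw [e]; exact PySem.List.pyGet?_ofNat (h := hk1)
    have hdrop : cs.drop (k - 1) = cs[k - 1] :: cs.drop k := by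
      have e : k - 1 + 1 = k := by omega
      rw [List.drop_eq_getElem_cons hk1, e]
    have hdrop2 : cs.drop k = cs[k] :: cs.drop (k + 1) :=
      List.drop_eq_getElem_cons h
    have ih := abecedarianGo_range cs (k + 1) (by omega)
    have e1 : k + 1 - 1 = k := by omega
    rw [e1] at ih
    simp only [abecedarianGo, hget, hget']
    push_cast at ih ⊢
    rw [ih, hdrop]
    by_cases hlt : cs[k - 1] < cs[k]
    · rw [if_pos (decide_eq_true (char_toNat_lt.mpr hlt)), decide_eq_decide, hdrop2]
      exact ⟨fun hc => List.isChain_cons_cons.mpr ⟨hlt, hc⟩,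
             fun hc => (List.isChain_cons_cons.mp hc).2⟩
    · rw [if_neg (by simp [char_toNat_lt, hlt]), eq_comm, decide_eq_false_iff_not, hdrop2]
      intro hc
      exact hlt (List.isChain_cons_cons.mp hc).1
  termination_by cs.length - k

-- A computes the strict-chain predicate on the character list.
theorem abecedarian_eq_chain (word : String) :
    abecedarian word = decide (word.toList.IsChain (· < ·)) := by
  have := abecedarianGo_range word.toList 1 (by omega)
  simpa [abecedarian] using this

-- B computes the same predicate: sorted-equal + duplicate-free ↔ strictly increasing.
theorem ofList_sublist {α : Type} [BEq α] [LawfulBEq α] (xs : List α) :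
    (PySem.Set.ofList xs).Sublist xs := by
  induction xs with
  | nil => simp [PySem.Set.ofList_nil]
  | cons x t ih =>
    rw [PySem.Set.ofList_cons]
    refine List.Sublist.cons₂ x (.trans ?_ ih)
    apply List.filter_sublist

theorem nodup_of_ofList_length {α : Type} [BEq α] [LawfulBEq α] (xs : List α)
    (h : (PySem.Set.ofList xs).length = xs.length) : xs.Nodup := by
  have := (ofList_sublist xs).eq_of_length h
  rw [← this]; exact PySem.Set.nodup_ofList xs

theorem abecedarian_alt_eq_chain (word : String) :
    abecedarian_alt word = decide (word.toList.IsChain (· < ·)) := by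
  rw [abecedarian_alt, Bool.eq_iff_iff]
  simp only [Bool.and_eq_true, beq_iff_eq, decide_eq_true_eq, List.isChain_iff_pairwise]
  constructor
  · rintro ⟨hs, hl⟩
    have hnd : word.toList.Nodup := nodup_of_ofList_length _ hl
    have hle : word.toList.Pairwise (· ≤ ·) := by
      have := PySem.List.sorted_pairwise (xs := word.toList) (key := fun x => x)
      rw [← hs] at this; exact this
    exact (List.Pairwise.and hle hnd).imp (fun h => lt_of_le_of_ne h.1 h.2)
  · intro hp
    have hnd : word.toList.Nodup := hp.nodup
    constructor
    · exact (PySem.List.sorted_eq_self_of_pairwise word.toList (fun x => x) (hp.imp le_of_lt)).symm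
    · rw [PySem.Set.ofList_eq_self_of_nodup _ hnd]

-- ===== VERDICT (by name: the statement is the Claim_ definition above) =====
theorem abecedarian_spec : Claim_equal_abecedarian := by
  intro word _
  unfold Spec_abecedarian
  rw [abecedarian_eq_chain, abecedarian_alt_eq_chain]
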